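-- pv_equiv track=rewrite | github.com/simoneart/Thermodynamics-of-a-prethermalizing-Ising-chain | fast.py | find_repeating_indices
-- ===== SOURCE A (Python) =====
-- def find_repeating_indices(lst):
--     """
--     Find the indices at which each repeating value appears in the list.
--
--     Parameters:
--     - lst: List of values.
--
--     Returns:
--     - indices_dict: Dictionary where keys are values that appear more than once
--                     and values are lists of corresponding indices.
--     """
--     counts = {}
--     for i, value in enumerate(lst):
--         if value in counts:
--             counts[value].append(i)
--         else:
--             counts[value] = [i]
--
--     repeating_indices_dict = {key: indices for key, indices in counts.items() if len(indices) > 1}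
--     return repeating_indices_dict
-- ===== SOURCE B (Python) =====
-- def find_repeating_indices(lst):
--     """
--     Find the indices at which each repeating value appears in the list.
--
--     Two passes: count every value first, then collect indices only for
--     values that occur more than once (first-appearance key order).
--     """
--     counts = {}
--     for value in lst:
--         counts[value] = counts.get(value, 0) + 1
--
--     result = {}
--     for i, value in enumerate(lst):
--         if counts[value] > 1:
--             result.setdefault(value, []).append(i)
--     return result
-- ===== Notes on version B (the rewrite author's own statement) =====
-- stated objective: alternative
-- what changed: A builds the full value->indices group for every value and then filters groups by length; B first builds a frequency table in one pass, then a second selective pass collects indices only for values whose total count exceeds 1, never materializing singleton groups.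
import Mathlib
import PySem

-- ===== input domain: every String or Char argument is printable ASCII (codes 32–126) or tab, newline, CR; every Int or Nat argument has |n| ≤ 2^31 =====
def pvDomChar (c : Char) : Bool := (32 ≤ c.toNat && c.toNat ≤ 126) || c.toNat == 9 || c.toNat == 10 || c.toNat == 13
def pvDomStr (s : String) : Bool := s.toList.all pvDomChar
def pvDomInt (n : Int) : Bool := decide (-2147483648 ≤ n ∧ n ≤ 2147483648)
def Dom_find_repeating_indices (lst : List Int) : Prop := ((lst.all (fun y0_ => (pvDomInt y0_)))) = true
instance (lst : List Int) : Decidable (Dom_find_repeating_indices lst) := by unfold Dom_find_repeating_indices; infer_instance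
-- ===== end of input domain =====

-- B replaces A's 'group every value, then filter groups' with 'count first, then collect indices only for repeated values';
-- same O(n) cost, different decomposition ('alternative').

-- ===== PORT A =====
-- A: one pass building value -> list of indices for EVERY value, then the comprehension keeping groups of length > 1.
def find_repeating_indices (lst : List Int) : List (Int × List Int) :=
  let counts := (PySem.List.enumerate lst).foldl
    (fun d p => if d.contains p.2 then d.modify p.2 [] (fun is => is ++ [p.1]) else d.insert p.2 [p.1])
    PySem.Dict.empty
  counts.items.filter (fun p => decide (1 < p.2.length))

-- ===== PORT B =====
-- B: pass 1 counts occurrences; pass 2 collects indices only for values whose total count exceeds 1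
-- (result.setdefault(v, []).append(i) is Dict.modify v [] (· ++ [i])).
def find_repeating_indices_alt (lst : List Int) : List (Int × List Int) :=
  let counts := lst.foldl (fun d v => d.insert v (d.getD v 0 + 1)) (PySem.Dict.empty : PySem.Dict Int Int)
  let result := (PySem.List.enumerate lst).foldl
    (fun d p => if counts.getD p.2 0 > 1 then d.modify p.2 [] (fun is => is ++ [p.1]) else d)
    PySem.Dict.empty
  result.items

-- ===== PRECONDITION & SPEC =====
def Spec_find_repeating_indices (lst : List Int) (out : List (Int × List Int)) : Prop := out = find_repeating_indices_alt lst
instance (lst : List Int) (out : List (Int × List Int)) : Decidable (Spec_find_repeating_indices lst out) := by unfold Spec_find_repeating_indices; infer_instance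

-- ===== CLAIM (what is proved, stated in full; the proofs are below) =====
def Claim_equal_find_repeating_indices : Prop := ∀ (lst : List Int), Dom_find_repeating_indices lst → Spec_find_repeating_indices lst (find_repeating_indices lst)

-- ===== LEMMAS AND PROOFS =====

-- r's items being a key-filter of d's items is the invariant tying B's selective dict to A's full dict.
lemma pvR_nodup (C : Int → Bool) (d r : PySem.Dict Int (List Int))
    (hnd : d.keys.Nodup) (hr : r.items = d.items.filter (fun p => C p.1)) : r.keys.Nodup := by
  have h2 : r.keys = (d.items.filter (fun p => C p.1)).map (·.1) := by
    simp only [PySem.Dict.keys, hr]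
  rw [h2]
  exact ((List.filter_sublist).map _).nodup hnd

lemma pvR_contains (C : Int → Bool) (d r : PySem.Dict Int (List Int))
    (hr : r.items = d.items.filter (fun p => C p.1)) (v : Int) :
    r.contains v = (C v && d.contains v) := by
  rw [Bool.eq_iff_iff, Bool.and_eq_true, PySem.Dict.contains_iff_mem_keys,
      PySem.Dict.contains_iff_mem_keys]
  simp only [PySem.Dict.keys, hr, List.mem_map, List.mem_filter]
  constructor
  · rintro ⟨p, ⟨hp, hC⟩, hv⟩
    exact ⟨by rw [← hv]; exact hC, ⟨p, hp, hv⟩⟩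
  · rintro ⟨hC, ⟨p, hp, hv⟩⟩
    exact ⟨p, ⟨hp, by rw [hv]; exact hC⟩, hv⟩

lemma pvR_getD (C : Int → Bool) (d r : PySem.Dict Int (List Int))
    (hnd : d.keys.Nodup) (hr : r.items = d.items.filter (fun p => C p.1)) (v : Int)
    (hc : d.contains v = true) (hC : C v = true) : r.getD v [] = d.getD v [] := by
  have hsome : (d.get? v).isSome := by rw [← PySem.Dict.contains_eq_isSome_get?, hc]
  obtain ⟨w, hw⟩ := Option.isSome_iff_exists.mp hsome
  have hmem : (v, w) ∈ d.items := (PySem.Dict.get?_eq_some_iff_mem_items d v w hnd).mp hw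
  have hmemr : (v, w) ∈ r.items := by
    rw [hr, List.mem_filter]; exact ⟨hmem, hC⟩
  rw [PySem.Dict.getD_of_mem_items _ hmemr (pvR_nodup C d r hnd hr) [],
      PySem.Dict.getD_of_get?_eq_some _ [] hw]

-- one loop step of B (conditional modify) vs one step of A (unconditional modify) preserves the invariant
lemma pvStep (C : Int → Bool) (d r : PySem.Dict Int (List Int))
    (hnd : d.keys.Nodup) (hr : r.items = d.items.filter (fun p => C p.1)) (i v : Int) :
    (if C v then r.modify v [] (fun is => is ++ [i]) else r).items
      = (d.modify v [] (fun is => is ++ [i])).items.filter (fun p => C p.1) := by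
  have hrc := pvR_contains C d r hr v
  simp only [PySem.Dict.modify]
  have hcg : ((fun p : Int × List Int => C p.1) ∘ fun p : Int × List Int => if (p.1 == v) = true then (v, d.getD v [] ++ [i]) else p) = fun p : Int × List Int => C p.1 := by
    funext p
    by_cases hpv : (p.1 == v) = true
    · have h1 : p.1 = v := by simpa using hpv
      simp [h1]
    · have h2 : p.1 ≠ v := by simpa using hpv
      simp [h2]
  by_cases hdc : d.contains v = true
  · rw [PySem.Dict.items_insert_of_contains _ _ hdc, List.filter_map, hcg]
    by_cases hC : C v = true
    · -- kept key: r also rewrites its v-entry in place, with the same old value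
      have hrcv : r.contains v = true := by rw [hrc, hC, hdc]; rfl
      rw [if_pos hC, PySem.Dict.items_insert_of_contains _ _ hrcv,
          pvR_getD C d r hnd hr v hdc hC, hr]
    · -- dropped key: the filtered list has no v-entry, so the rewriting map is the identity on it
      have hCf : C v = false := by rwa [Bool.not_eq_true] at hC
      rw [if_neg hC, hr, List.map_congr_left ?_, List.map_id]
      intro p hp
      rw [List.mem_filter] at hp
      have hne : (p.1 == v) = false := by
        rw [beq_eq_false_iff_ne]
        intro hpe
        rw [hpe, hCf] at hp
        exact Bool.false_ne_true hp.2
      simp [hne]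
  · -- fresh key in d: both sides append (or skip) the new entry
    have hdcf : d.contains v = false := by rwa [Bool.not_eq_true] at hdc
    rw [PySem.Dict.items_insert_of_not_contains _ _ hdcf, List.filter_append,
        PySem.Dict.getD_of_not_contains _ _ hdcf]
    by_cases hC : C v = true
    · have hrcf : r.contains v = false := by rw [hrc, hdcf, Bool.and_false]
      rw [if_pos hC, PySem.Dict.items_insert_of_not_contains _ _ hrcf,
          PySem.Dict.getD_of_not_contains _ _ hrcf, hr]
      simp [hC]
    · have hCf : C v = false := by rwa [Bool.not_eq_true] at hC
      rw [if_neg hC, hr]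
      simp [hCf]

lemma pvNodupStep (d : PySem.Dict Int (List Int)) (hnd : d.keys.Nodup) (i v : Int) :
    (d.modify v [] (fun is => is ++ [i])).keys.Nodup := by
  have := PySem.Dict.nodup_keys_foldl_modify_key [(i, v)] (fun p => p.2) []
    (fun _ p => (fun is => is ++ [p.1])) d hnd
  simpa using this

-- main invariant: B's selective fold computes exactly the C-filtered items of A's full grouping fold
lemma pvMain (C : Int → Bool) (l : List (Int × Int)) (d r : PySem.Dict Int (List Int))
    (hnd : d.keys.Nodup) (hr : r.items = d.items.filter (fun p => C p.1)) :
    (l.foldl (fun d p => if C p.2 then d.modify p.2 [] (fun is => is ++ [p.1]) else d) r).items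
      = (l.foldl (fun d p => d.modify p.2 [] (fun is => is ++ [p.1])) d).items.filter (fun p => C p.1) := by
  induction l generalizing d r with
  | nil => simpa using hr
  | cons p l ih =>
    simp only [List.foldl_cons]
    exact ih (d.modify p.2 [] (fun is => is ++ [p.1]))
      (if C p.2 then r.modify p.2 [] (fun is => is ++ [p.1]) else r)
      (pvNodupStep d hnd p.1 p.2) (pvStep C d r hnd hr p.1 p.2)

lemma pvGroup_getD (l : List (Int × Int)) (v : Int) :
    (l.foldl (fun d p => d.modify p.2 [] (fun is => is ++ [p.1])) PySem.Dict.empty).getD v [] = (l.filter (fun p => p.2 == v)).map (·.1) := by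
  have h : l.foldl (fun d p => d.modify p.2 [] (fun is => is ++ [p.1])) PySem.Dict.empty
      = (l.map Prod.swap).foldl (fun d p => d.modify p.1 [] (fun is => is ++ [p.2])) PySem.Dict.empty := by
    simp [List.foldl_map, Prod.swap]
  rw [h, PySem.Dict.getD_foldl_modify_append]
  simp [PySem.Dict.getD_empty, List.filter_map, Function.comp_def, Prod.swap]

lemma pvGroup_nodup (l : List (Int × Int)) :
    (l.foldl (fun d p => d.modify p.2 [] (fun is => is ++ [p.1])) PySem.Dict.empty).keys.Nodup :=
  PySem.Dict.nodup_keys_foldl_modify_key l (fun p => p.2) [] (fun _ p => (fun is => is ++ [p.1])) PySem.Dict.empty (by simp)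

-- in A's final dict, the group stored under v has length = the number of occurrences of v
lemma pvLen (lst : List Int) (v : Int) :
    (((PySem.List.enumerate lst).filter (fun q => q.2 == v)).map (·.1)).length = lst.count v := by
  rw [List.length_map, ← List.countP_eq_length_filter]
  have h := List.countP_map (p := fun x : Int => x == v) (f := fun q : Int × Int => q.2) (l := PySem.List.enumerate lst)
  rw [PySem.List.map_snd_enumerate] at h
  rw [List.count]
  exact h.symm

-- A's branch 'append if present else insert [i]' IS an unconditional modify with default []
lemma pvA_step_eq :
    (fun (d : PySem.Dict Int (List Int)) (p : Int × Int) =>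
      if d.contains p.2 then d.modify p.2 [] (fun is => is ++ [p.1]) else d.insert p.2 [p.1])
    = (fun d p => d.modify p.2 [] (fun is => is ++ [p.1])) := by
  funext d p
  by_cases h : d.contains p.2
  · simp [h]
  · simp only [Bool.not_eq_true] at h
    simp [h, PySem.Dict.modify, PySem.Dict.getD_of_not_contains]

lemma pvFinal (lst : List Int) : find_repeating_indices lst = find_repeating_indices_alt lst := by
  unfold find_repeating_indices find_repeating_indices_alt
  rw [pvA_step_eq]
  have hcnt : ∀ v : Int, (lst.foldl (fun d v => d.insert v (d.getD v 0 + 1)) (PySem.Dict.empty : PySem.Dict Int Int)).getD v 0 = (lst.count v : Int) := by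
    intro v
    rw [PySem.Dict.getD_foldl_insert_add_one, PySem.Dict.getD_empty, zero_add]
  have hstep : (fun (d : PySem.Dict Int (List Int)) (p : Int × Int) =>
      if (lst.foldl (fun d v => d.insert v (d.getD v 0 + 1)) (PySem.Dict.empty : PySem.Dict Int Int)).getD p.2 0 > 1
      then d.modify p.2 [] (fun is => is ++ [p.1]) else d)
      = (fun d p => if decide (1 < (lst.count p.2 : Int)) = true then d.modify p.2 [] (fun is => is ++ [p.1]) else d) := by
    funext d p
    rw [hcnt p.2]
    by_cases h : (1 : Int) < (lst.count p.2 : Int) <;> simp [h]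
  simp only [hstep]
  rw [pvMain (fun v => decide (1 < (lst.count v : Int))) (PySem.List.enumerate lst)
      PySem.Dict.empty PySem.Dict.empty (by simp) (by rfl)]
  apply List.filter_congr
  intro p hp
  have hlen : p.2.length = lst.count p.1 := by
    have hg := PySem.Dict.getD_of_mem_items _ hp (pvGroup_nodup (PySem.List.enumerate lst)) []
    rw [pvGroup_getD] at hg
    rw [← hg, pvLen]
  rw [hlen]
  simp only [decide_eq_decide]
  omega

-- ===== VERDICT (by name: the statement is the Claim_ definition above) =====
theorem find_repeating_indices_spec : Claim_equal_find_repeating_indices := by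
  intro lst _
  unfold Spec_find_repeating_indices
  exact pvFinal lst
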